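-- pv_equiv track=rewrite | github.com/ZRimgaila/Genetic-algorithm-for-bicriteric-TSP | GA_BOTSP.py | domSolutions
-- ===== SOURCE A (Python) =====
-- def domSolutions(val, t):
--     rank = 0
--     for i in range(len(val)):
--         if val[t][0] > val[i][0] and val[t][1] > val[i][1] and t!=i:
--             rank += 2
--         else:
--             if val[t][0] > val[i][0] and t!=i:
--                 rank += 1
--             else:
--                 if val[t][1] > val[i][1] and t!=i:
--                     rank += 1
--     return rank
-- ===== SOURCE B (Python) =====
-- def domSolutions(val, t):
--     x0, x1 = val[t]
--     count0 = sum(1 for v in val if v[0] < x0)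
--     count1 = sum(1 for v in val if v[1] < x1)
--     return count0 + count1
-- ===== Notes on version B (the rewrite author's own statement) =====
-- stated objective: simpler
-- what changed: The nested +2/+1/+1 branch cascade over indices (with a never-firing t!=i guard) is replaced by two flat counting passes over the elements: the number of elements strictly below val[t] in the first coordinate plus the number strictly below in the second.
-- outside the precondition, e.g. on domSolutions([], 0): A returns 0, B raises IndexError
import Mathlib
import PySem

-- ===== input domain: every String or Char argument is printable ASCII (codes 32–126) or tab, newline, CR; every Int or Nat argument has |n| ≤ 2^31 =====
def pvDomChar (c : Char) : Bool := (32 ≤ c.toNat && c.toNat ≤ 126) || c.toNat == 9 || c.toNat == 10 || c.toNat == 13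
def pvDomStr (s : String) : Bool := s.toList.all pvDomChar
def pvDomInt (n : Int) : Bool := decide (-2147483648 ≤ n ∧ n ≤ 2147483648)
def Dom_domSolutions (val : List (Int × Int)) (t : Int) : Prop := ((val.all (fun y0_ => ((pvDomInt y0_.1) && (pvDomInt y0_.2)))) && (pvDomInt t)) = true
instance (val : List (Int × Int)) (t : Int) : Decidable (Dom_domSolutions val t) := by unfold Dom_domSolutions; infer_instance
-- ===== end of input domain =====

-- B replaces A's nested branch cascade over range(len(val)) by two flat counting
-- passes over the elements (strictly-smaller first coordinates plus strictly-smaller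
-- second coordinates); same O(n) cost, plainer control flow.

-- ===== PORT A =====
-- Python A: rank loop over range(len(val)) with the +2/+1/+1 branch cascade.
-- val[t] and val[i] are ported with pyGetD; Pre_ keeps t in range so the default is never read.
def domSolutions (val : List (Int × Int)) (t : Int) : Int :=
  (PySem.List.pyRange 0 (val.length : Int) 1).foldl (fun rank i =>
    if (PySem.List.pyGetD val t (0, 0)).1 > (PySem.List.pyGetD val i (0, 0)).1 ∧
       (PySem.List.pyGetD val t (0, 0)).2 > (PySem.List.pyGetD val i (0, 0)).2 ∧ t ≠ i then
      rank + 2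
    else if (PySem.List.pyGetD val t (0, 0)).1 > (PySem.List.pyGetD val i (0, 0)).1 ∧ t ≠ i then
      rank + 1
    else if (PySem.List.pyGetD val t (0, 0)).2 > (PySem.List.pyGetD val i (0, 0)).2 ∧ t ≠ i then
      rank + 1
    else rank) 0

-- ===== PORT B =====
-- Python B: x0, x1 = val[t]; two generator-sum counting passes over val.
def domSolutions_alt (val : List (Int × Int)) (t : Int) : Int :=
  let x0 := (PySem.List.pyGetD val t (0, 0)).1
  let x1 := (PySem.List.pyGetD val t (0, 0)).2
  let count0 := val.foldl (fun c v => c + (if v.1 < x0 then 1 else 0)) 0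
  let count1 := val.foldl (fun c v => c + (if v.2 < x1 then 1 else 0)) 0
  count0 + count1

-- ===== PRECONDITION & SPEC =====
-- Pre_ excludes out-of-range t: there Python A raises IndexError — except on the empty
-- list, where A's loop never touches val[t] and returns 0 while the natural B indexes
-- val[t] first and raises.
def Pre_domSolutions (val : List (Int × Int)) (t : Int) : Prop :=
  PySem.Raise.InRange val.length t
instance (val : List (Int × Int)) (t : Int) : Decidable (Pre_domSolutions val t) := by
  unfold Pre_domSolutions; infer_instance
def pvWitness_domSolutions : (List (Int × Int)) × Int := ([(1, 2), (3, 1), (0, 0)], 1)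
def Spec_domSolutions (val : List (Int × Int)) (t : Int) (out : Int) : Prop := out = domSolutions_alt val t
instance (val : List (Int × Int)) (t : Int) (out : Int) : Decidable (Spec_domSolutions val t out) := by unfold Spec_domSolutions; infer_instance

-- ===== CLAIM (what is proved, stated in full; the proofs are below) =====
def Claim_equal_domSolutions : Prop := ∀ (val : List (Int × Int)) (t : Int), Dom_domSolutions val t → Pre_domSolutions val t → Spec_domSolutions val t (domSolutions val t)

-- ===== LEMMAS AND PROOFS =====

-- Per-index body of A's loop equals the sum of the two 0/1 counts B makes for that
-- element.  When t = i the two fetched pairs coincide, so every strict comparison fails.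
lemma domSolutions_body_eq (val : List (Int × Int)) (t i acc : Int) :
    (if (PySem.List.pyGetD val t (0, 0)).1 > (PySem.List.pyGetD val i (0, 0)).1 ∧
        (PySem.List.pyGetD val t (0, 0)).2 > (PySem.List.pyGetD val i (0, 0)).2 ∧ t ≠ i then
       acc + 2
     else if (PySem.List.pyGetD val t (0, 0)).1 > (PySem.List.pyGetD val i (0, 0)).1 ∧ t ≠ i then
       acc + 1
     else if (PySem.List.pyGetD val t (0, 0)).2 > (PySem.List.pyGetD val i (0, 0)).2 ∧ t ≠ i then
       acc + 1
     else acc)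
    = acc + ((if (PySem.List.pyGetD val i (0, 0)).1 < (PySem.List.pyGetD val t (0, 0)).1 then 1 else 0)
           + (if (PySem.List.pyGetD val i (0, 0)).2 < (PySem.List.pyGetD val t (0, 0)).2 then 1 else 0)) := by
  by_cases h : t = i
  · subst h; simp
  · split_ifs <;> simp_all


-- ===== VERDICT (by name: the statement is the Claim_ definition above) =====
theorem domSolutions_spec : Claim_equal_domSolutions := by
  intro val t _ _
  unfold Spec_domSolutions domSolutions domSolutions_alt
  rw [PySem.List.foldl_congr_mem _ _
        (fun acc i =>
          acc + ((if (PySem.List.pyGetD val i (0, 0)).1 < (PySem.List.pyGetD val t (0, 0)).1 then 1 else 0)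
               + (if (PySem.List.pyGetD val i (0, 0)).2 < (PySem.List.pyGetD val t (0, 0)).2 then 1 else 0)))
        0 (fun acc i _ => domSolutions_body_eq val t i acc),
      PySem.List.foldl_pyRange_zero_pyGetD' val (0, 0)
        (fun acc v => acc + ((if v.1 < (PySem.List.pyGetD val t (0, 0)).1 then 1 else 0)
                           + (if v.2 < (PySem.List.pyGetD val t (0, 0)).2 then 1 else 0))) 0,
      PySem.List.foldl_add, PySem.List.sum_map_add_int]
  simp only [PySem.List.foldl_add]
  ring
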